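-- pv_equiv track=rewrite | github.com/abrazinskas/FewSum | mltoolkit/mlutils/helpers/formatting/seq.py | format_seq
-- ===== SOURCE A (Python) =====
-- def format_seq(seq, start, end, pad, retain_end=True):
--     """Makes each sequence end when the first `end` or `pad` is encountered."""
--     formatted_seq = []
--     for id in seq:
--         if id == start:
--             continue
--         if id == end:
--             if retain_end:
--                 formatted_seq.append(id)
--             break
--         if id == pad:
--             break
--         formatted_seq.append(id)
--     return formatted_seq
-- ===== SOURCE B (Python) =====
-- def format_seq(seq, start, end, pad, retain_end=True):
--     cut = len(seq)
--     end_hit = False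
--     for i, t in enumerate(seq):
--         if t == start:
--             continue
--         if t == end or t == pad:
--             cut = i
--             end_hit = (t == end)
--             break
--     body = [t for t in seq[:cut] if t != start]
--     if end_hit and retain_end:
--         body.append(end)
--     return body
-- ===== Notes on version B (the rewrite author's own statement) =====
-- stated objective: alternative
-- what changed: Replaces A's single fused build-and-break loop with a locate-then-slice decomposition: one loop finds the cut index and whether the terminator was `end`, then the body is a slice filtered of `start` tokens, with `end` appended afterwards if retained.
import Mathlib
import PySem

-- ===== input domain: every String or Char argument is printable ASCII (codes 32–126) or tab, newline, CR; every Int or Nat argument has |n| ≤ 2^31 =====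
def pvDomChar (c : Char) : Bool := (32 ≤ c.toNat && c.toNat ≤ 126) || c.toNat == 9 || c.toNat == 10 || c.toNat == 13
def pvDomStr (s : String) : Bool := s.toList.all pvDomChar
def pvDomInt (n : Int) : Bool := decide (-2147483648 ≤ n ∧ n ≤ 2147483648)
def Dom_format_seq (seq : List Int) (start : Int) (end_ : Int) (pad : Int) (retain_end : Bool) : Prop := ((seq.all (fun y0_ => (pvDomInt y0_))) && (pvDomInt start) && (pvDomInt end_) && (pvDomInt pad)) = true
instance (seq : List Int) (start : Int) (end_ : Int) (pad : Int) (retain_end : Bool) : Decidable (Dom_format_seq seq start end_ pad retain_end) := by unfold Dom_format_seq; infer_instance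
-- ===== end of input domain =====

-- B replaces A's fused build-and-break loop by locate-cut-then-slice-and-filter (objective: alternative decomposition, same cost).

-- ===== PORT A =====
-- A's for-loop with continue/break, as structural recursion building the result front-to-back.
def format_seq (seq : List Int) (start : Int) (end_ : Int) (pad : Int) (retain_end : Bool) : List Int :=
  match seq with
  | [] => []
  | id :: rest =>
    if id = start then format_seq rest start end_ pad retain_end
    else if id = end_ then (if retain_end then [id] else [])
    else if id = pad then []
    else id :: format_seq rest start end_ pad retain_end

-- ===== PORT B =====
-- B's locating loop: returns (cut index, end_hit); cut = length when no terminator is found.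
def pvLocate (start end_ pad : Int) (seq : List Int) : Nat × Bool :=
  match seq with
  | [] => (0, false)
  | t :: rest =>
    if t = start then
      let r := pvLocate start end_ pad rest; (r.1 + 1, r.2)
    else if t = end_ ∨ t = pad then (0, decide (t = end_))
    else
      let r := pvLocate start end_ pad rest; (r.1 + 1, r.2)

def format_seq_alt (seq : List Int) (start : Int) (end_ : Int) (pad : Int) (retain_end : Bool) : List Int :=
  let r := pvLocate start end_ pad seq
  let body := (seq.take r.1).filter (fun t => t != start)
  if r.2 && retain_end then body ++ [end_] else body

-- ===== PRECONDITION & SPEC =====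
def Spec_format_seq (seq : List Int) (start : Int) (end_ : Int) (pad : Int) (retain_end : Bool) (out : List Int) : Prop := out = format_seq_alt seq start end_ pad retain_end
instance (seq : List Int) (start : Int) (end_ : Int) (pad : Int) (retain_end : Bool) (out : List Int) : Decidable (Spec_format_seq seq start end_ pad retain_end out) := by unfold Spec_format_seq; infer_instance

-- ===== CLAIM (what is proved, stated in full; the proofs are below) =====
def Claim_equal_format_seq : Prop := ∀ (seq : List Int) (start : Int) (end_ : Int) (pad : Int) (retain_end : Bool), Dom_format_seq seq start end_ pad retain_end → Spec_format_seq seq start end_ pad retain_end (format_seq seq start end_ pad retain_end)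

-- ===== LEMMAS AND PROOFS =====
theorem format_seq_eq_alt (seq : List Int) (start end_ pad : Int) (retain_end : Bool) :
    format_seq seq start end_ pad retain_end = format_seq_alt seq start end_ pad retain_end := by
  induction seq with
  | nil => simp [format_seq, format_seq_alt, pvLocate]
  | cons t rest ih =>
    by_cases hs : t = start
    · simp [format_seq, format_seq_alt, pvLocate, hs, ih]
    · by_cases he : t = end_
      · subst he
        simp [format_seq, format_seq_alt, pvLocate, hs]
      · by_cases hp : t = pad
        · subst hp
          simp [format_seq, format_seq_alt, pvLocate, hs, he]
        · simp [format_seq, format_seq_alt, pvLocate, hs, he, hp, ih]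
          split <;> simp

-- ===== VERDICT (by name: the statement is the Claim_ definition above) =====
theorem format_seq_spec : Claim_equal_format_seq := by
  intro seq start end_ pad retain_end _
  exact format_seq_eq_alt seq start end_ pad retain_end
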